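-- pv_equiv track=rewrite | github.com/mzahnd/probabilidad-y-estadistica-9324 | guia0/guia0.py | get_range
-- ===== SOURCE A (Python) =====
-- def get_range(data):
--     """..."""
--     max_val = 0
--     min_val = 0
--     for element in data:
--         if element > max_val:
--             max_val = element
--         elif element < min_val:
--             min_val = element
--
--     return max_val - min_val
-- ===== SOURCE B (Python) =====
-- def get_range(data):
--     vals = list(data)
--     hi = max([0] + vals)
--     lo = min([0] + vals)
--     return hi - lo
-- ===== Notes on version B (the rewrite author's own statement) =====
-- stated objective: simpler
-- what changed: Replaces A's single fused loop maintaining two accumulators with two separate built-in max/min reductions over the list seeded with 0, then subtracts.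
import Mathlib
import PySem

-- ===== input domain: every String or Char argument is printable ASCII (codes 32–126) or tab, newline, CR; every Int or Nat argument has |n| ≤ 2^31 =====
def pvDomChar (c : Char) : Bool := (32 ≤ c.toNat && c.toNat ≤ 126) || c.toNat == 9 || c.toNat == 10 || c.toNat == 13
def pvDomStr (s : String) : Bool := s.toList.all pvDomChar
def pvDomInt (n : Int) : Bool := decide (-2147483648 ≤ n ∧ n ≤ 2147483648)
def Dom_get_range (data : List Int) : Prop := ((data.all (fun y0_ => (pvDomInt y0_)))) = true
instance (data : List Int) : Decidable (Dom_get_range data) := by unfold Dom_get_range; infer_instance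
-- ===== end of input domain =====

-- B computes the range with two separate max/min reductions over the 0-seeded list instead of A's fused loop with two accumulators (simpler decomposition, same O(n) cost).


-- ===== PORT A =====
-- fused loop: one pass carrying (max_val, min_val), branches in A's order
def get_range (data : List Int) : Int :=
  let st := data.foldl (fun (s : Int × Int) element =>
    if element > s.1 then (element, s.2)
    else if element < s.2 then (s.1, element)
    else s) (0, 0)
  st.1 - st.2

-- ===== PORT B =====
-- two independent reductions over the 0-seeded list (Python max([0]+vals) / min([0]+vals))
def get_range_alt (data : List Int) : Int :=
  let hi := ((0 :: data).foldl max 0)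
  let lo := ((0 :: data).foldl min 0)
  hi - lo

-- ===== PRECONDITION & SPEC =====
def Spec_get_range (data : List Int) (out : Int) : Prop := out = get_range_alt data
instance (data : List Int) (out : Int) : Decidable (Spec_get_range data out) := by unfold Spec_get_range; infer_instance

-- ===== CLAIM (what is proved, stated in full; the proofs are below) =====
def Claim_equal_get_range : Prop := ∀ (data : List Int), Dom_get_range data → Spec_get_range data (get_range data)

-- ===== LEMMAS AND PROOFS =====

-- invariant: A's fused state equals the pair of the two reductions, provided mn ≤ 0 ≤ mx
theorem get_range_inv (data : List Int) : ∀ (mx mn : Int), mn ≤ 0 → 0 ≤ mx →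
    data.foldl (fun (s : Int × Int) element =>
      if element > s.1 then (element, s.2)
      else if element < s.2 then (s.1, element)
      else s) (mx, mn)
    = (data.foldl max mx, data.foldl min mn) := by
  induction data with
  | nil => intro mx mn _ _; simp
  | cons e t ih =>
    intro mx mn hmn hmx
    simp only [List.foldl]
    by_cases h1 : e > mx
    · simp only [if_pos h1]
      have : max mx e = e := by omega
      have hmin : min mn e = mn := by omega
      rw [this, hmin]
      exact ih e mn hmn (by omega)
    · simp only [if_neg h1]
      by_cases h2 : e < mn
      · simp only [if_pos h2]
        have : max mx e = mx := by omega
        have hmin : min mn e = e := by omega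
        rw [this, hmin]
        exact ih mx e (by omega) hmx
      · simp only [if_neg h2]
        have : max mx e = mx := by omega
        have hmin : min mn e = mn := by omega
        rw [this, hmin]
        exact ih mx mn hmn hmx

-- ===== VERDICT (by name: the statement is the Claim_ definition above) =====
theorem get_range_spec : Claim_equal_get_range := by
  intro data _
  unfold Spec_get_range get_range get_range_alt
  rw [get_range_inv data 0 0 le_rfl le_rfl]
  simp
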